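-- pv_equiv track=rewrite | github.com/karthikeya-bharadwaj-m/linked-list | 1st.py | solution
-- ===== SOURCE A (Python) =====
-- def solution (A):
--     max_sum  = -1
--     dig_set = [set(str(i)) for i in A]
--     both_num = ()
--     for i in range (len(A)):
--         for j in range(i+1,len(A)):
--             if not dig_set[i].intersection(dig_set[j]):
--                 cur_sum = A[i]+ A[j]
--                 if cur_sum > max_sum:
--                     max_sum = cur_sum
--                     both_num = (A[i], A[j])
--     return max_sum
-- ===== SOURCE B (Python) =====
-- def solution(A):
--     # Bucket elements by their canonical digit-character set (sorted tuple of the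
--     # distinct characters of str(x)); the dict keeps the maximum value per bucket,
--     # so each element is combined with per-bucket maxima only, not with every
--     # earlier element: O(n*K), K = number of distinct digit-sets (bounded, <= 2**11).
--     best = -1
--     seen = {}
--     for x in A:
--         ks = set(str(x))
--         k = tuple(sorted(ks))
--         for k2, v in seen.items():
--             if ks.isdisjoint(k2):
--                 s = v + x
--                 if s > best:
--                     best = s
--         if k not in seen or x > seen[k]:
--             seen[k] = x
--     return best
-- ===== Notes on version B (the rewrite author's own statement) =====
-- stated objective: faster
-- what changed: Replaces the all-pairs double loop with a single pass that buckets elements by their set of decimal characters in a dict keeping the per-bucket maximum, combining each element only with the per-bucket maxima of earlier elements.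
import Mathlib
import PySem

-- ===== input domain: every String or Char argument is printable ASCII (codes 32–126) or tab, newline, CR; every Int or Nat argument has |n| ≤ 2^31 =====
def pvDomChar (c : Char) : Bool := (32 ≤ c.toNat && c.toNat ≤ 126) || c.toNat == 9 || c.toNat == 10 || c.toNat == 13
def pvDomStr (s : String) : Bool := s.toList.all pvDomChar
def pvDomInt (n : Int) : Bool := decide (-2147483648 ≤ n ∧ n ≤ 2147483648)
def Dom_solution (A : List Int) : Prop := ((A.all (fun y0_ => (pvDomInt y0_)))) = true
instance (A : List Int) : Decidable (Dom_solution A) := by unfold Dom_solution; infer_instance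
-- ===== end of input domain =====

-- B buckets elements by their set of decimal characters (dict keyed by the sorted tuple of
-- distinct chars of str(x), value = per-bucket maximum) and combines each element with the
-- per-bucket maxima of earlier elements instead of with every earlier element.

-- ===== PORT A =====
-- (A's variable both_num is assigned but never read and not returned: omitted from the port)
def solution (A : List Int) : Int :=
  let digSet : List (PySem.Set Char) := A.map (fun i => PySem.Set.ofList (PySem.Int.toChars i))
  (PySem.List.pyRange 0 (PySem.List.len A) 1).foldl (fun maxSum i =>
    (PySem.List.pyRange (i + 1) (PySem.List.len A) 1).foldl (fun maxSum j =>
      if (PySem.Set.inter (PySem.List.pyGetD digSet i PySem.Set.empty)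
            (PySem.List.pyGetD digSet j PySem.Set.empty)).isEmpty then
        let curSum := PySem.List.pyGetD A i 0 + PySem.List.pyGetD A j 0
        if curSum > maxSum then curSum else maxSum
      else maxSum) maxSum) (-1)

-- ===== PORT B =====
def solutionAltStep (st : Int × PySem.Dict (List Char) Int) (x : Int) :
    Int × PySem.Dict (List Char) Int :=
  let ks : PySem.Set Char := PySem.Set.ofList (PySem.Int.toChars x)
  let k : List Char := PySem.List.sorted ks (fun c => c) false
  let best := st.2.items.foldl (fun best p =>
    if PySem.Set.isdisjoint ks p.1 then
      let s := p.2 + x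
      if s > best then s else best
    else best) st.1
  let seen := if !st.2.contains k || st.2.getD k 0 < x then st.2.insert k x else st.2
  (best, seen)

def solution_alt (A : List Int) : Int :=
  (A.foldl solutionAltStep (-1, PySem.Dict.empty)).1

-- ===== PRECONDITION & SPEC =====
def Spec_solution (A : List Int) (out : Int) : Prop := out = solution_alt A
instance (A : List Int) (out : Int) : Decidable (Spec_solution A out) := by unfold Spec_solution; infer_instance

-- ===== CLAIM (what is proved, stated in full; the proofs are below) =====
def Claim_equal_solution : Prop := ∀ (A : List Int), Dom_solution A → Spec_solution A (solution A)

-- ===== LEMMAS AND PROOFS =====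

/-- The set of characters of str(x). -/
def chset (x : Int) : PySem.Set Char := PySem.Set.ofList (PySem.Int.toChars x)

/-- The canonical dict key B uses for x. -/
def canonKey (x : Int) : List Char := PySem.List.sorted (chset x) (fun c => c) false

/-- str-charsets of x and y are disjoint. -/
def Disj (x y : Int) : Prop := ∀ c, c ∈ chset x → c ∉ chset y

/-- r is the value both programs aim at: max of -1 and all sums of ordered pairs of A
with disjoint char-sets. -/
def GoodRes (A : List Int) (r : Int) : Prop :=
  (r = -1 ∨ ∃ y z, [y, z].Sublist A ∧ Disj y z ∧ r = y + z) ∧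
  (-1 ≤ r) ∧
  (∀ y z, [y, z].Sublist A → Disj y z → y + z ≤ r)

lemma mem_canonKey {c : Char} {x : Int} : c ∈ canonKey x ↔ c ∈ chset x := by
  simp [canonKey, PySem.List.mem_sorted]

lemma goodRes_unique {A : List Int} {r s : Int} (hr : GoodRes A r) (hs : GoodRes A s) : r = s := by
  obtain ⟨hw, hlb, hub⟩ := hr
  obtain ⟨hw', hlb', hub'⟩ := hs
  have h1 : r ≤ s := by
    rcases hw with h | ⟨y, z, hsub, hd, rfl⟩
    · omega
    · exact hub' y z hsub hd
  have h2 : s ≤ r := by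
    rcases hw' with h | ⟨y, z, hsub, hd, rfl⟩
    · omega
    · exact hub y z hsub hd
  omega



lemma pair_sublist_iff {y z : Int} {l : List Int} :
    [y, z].Sublist l ↔ ∃ i j : Nat, i < j ∧ l[i]? = some y ∧ l[j]? = some z := by
  induction l with
  | nil => simp
  | cons a t ih =>
    constructor
    · intro h
      cases h with
      | cons _ h1 =>
        obtain ⟨i, j, hij, hy, hz⟩ := ih.mp h1
        exact ⟨i + 1, j + 1, by omega, by simpa using hy, by simpa using hz⟩
      | cons₂ _ h1 =>
        have hz : z ∈ t := h1.subset (by simp)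
        obtain ⟨j, hj⟩ := List.mem_iff_getElem?.mp hz
        exact ⟨0, j + 1, by omega, by simp, by simpa using hj⟩
    · rintro ⟨i, j, hij, hy, hz⟩
      match i, j with
      | 0, j + 1 =>
        simp only [List.getElem?_cons_zero, Option.some.injEq] at hy
        simp only [List.getElem?_cons_succ] at hz
        subst hy
        have hzt : z ∈ t := by
          rcases List.getElem?_eq_some_iff.mp hz with ⟨hlt, he⟩
          exact he ▸ List.getElem_mem hlt
        exact List.Sublist.cons₂ _ (List.singleton_sublist.mpr hzt)
      | i + 1, j + 1 =>
        simp only [List.getElem?_cons_succ] at hy hz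
        exact List.Sublist.cons _ (ih.mpr ⟨i, j, by omega, hy, hz⟩)

lemma pair_sublist_append_singleton {y z x : Int} {l : List Int} :
    [y, z].Sublist (l ++ [x]) ↔ [y, z].Sublist l ∨ (y ∈ l ∧ z = x) := by
  constructor
  · intro h
    obtain ⟨r₁, r₂, heq, h1, h2⟩ := List.sublist_append_iff.mp h
    rcases List.sublist_singleton.mp h2 with rfl | rfl
    · simp only [List.append_nil] at heq; subst heq; exact Or.inl h1
    · rcases r₁ with _ | ⟨w, _ | ⟨w2, r⟩⟩
      · have hlen := congrArg List.length heq; simp at hlen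
      · simp only [List.cons_append, List.nil_append] at heq
        obtain ⟨rfl, rfl, -⟩ : y = w ∧ z = x ∧ True := by
          have h1' := heq
          simp only [List.cons.injEq] at h1'
          exact ⟨h1'.1, h1'.2.1, trivial⟩
        exact Or.inr ⟨List.singleton_sublist.mp h1, rfl⟩
      · have hlen := congrArg List.length heq; simp at hlen
  · rintro (h | ⟨hy, hz⟩)
    · exact h.trans (List.sublist_append_left l [x])
    · subst hz
      exact List.Sublist.append (List.singleton_sublist.mpr hy) (List.Sublist.refl _)

-- ---- shared loop-shape helper ----

lemma foldl_ifmax_eq {α : Type} (l : List α) (p : α → Bool) (f : α → Int) (a : Int) :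
    l.foldl (fun acc e => if p e then (if f e > acc then f e else acc) else acc) a
      = ((l.filter p).map f).foldl max a := by
  rw [PySem.List.foldl_if_eq_foldl_filter, List.foldl_map]
  apply PySem.List.foldl_congr_mem
  intro acc e _
  simp only [max_def]
  split_ifs <;> omega

lemma foldl_foldl_max {α : Type} (l : List α) (g : α → List Int) (a : Int) :
    l.foldl (fun acc i => (g i).foldl max acc) a = (l.flatMap g).foldl max a := by
  induction l generalizing a with
  | nil => rfl
  | cons v t ih => simp [List.flatMap_cons, List.foldl_append, ih]

-- ---- A side ----

def testA (A : List Int) (i j : Int) : Bool :=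
  (PySem.Set.inter
    (PySem.List.pyGetD (A.map (fun v => PySem.Set.ofList (PySem.Int.toChars v))) i PySem.Set.empty)
    (PySem.List.pyGetD (A.map (fun v => PySem.Set.ofList (PySem.Int.toChars v))) j PySem.Set.empty)).isEmpty

def sumA (A : List Int) (i j : Int) : Int := PySem.List.pyGetD A i 0 + PySem.List.pyGetD A j 0

def LA (A : List Int) : List Int :=
  (PySem.List.pyRange 0 (PySem.List.len A) 1).flatMap (fun i =>
    ((PySem.List.pyRange (i + 1) (PySem.List.len A) 1).filter (fun j => testA A i j)).map
      (fun j => sumA A i j))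

lemma solution_eq (A : List Int) : solution A = (LA A).foldl max (-1) := by
  have h : solution A =
      (PySem.List.pyRange 0 (PySem.List.len A) 1).foldl (fun maxSum i =>
        (PySem.List.pyRange (i + 1) (PySem.List.len A) 1).foldl (fun acc j =>
          if testA A i j then (if sumA A i j > acc then sumA A i j else acc) else acc) maxSum)
        (-1) := rfl
  rw [h]
  unfold LA
  rw [← foldl_foldl_max]
  apply PySem.List.foldl_congr_mem
  intro acc i _
  exact foldl_ifmax_eq _ _ _ _

lemma pyGetD_map_chset {A : List Int} {i : Int} (h0 : 0 ≤ i) (h : i < (A.length : Int)) :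
    PySem.List.pyGetD (A.map (fun v => PySem.Set.ofList (PySem.Int.toChars v))) i PySem.Set.empty
      = chset (PySem.List.pyGetD A i 0) := by
  rw [PySem.List.pyGetD_eq_getElem (A.map (fun v => PySem.Set.ofList (PySem.Int.toChars v)))
      PySem.Set.empty h0 (by simpa using h),
    PySem.List.pyGetD_eq_getElem A 0 h0 h]
  simp [chset]

lemma testA_iff {A : List Int} {i j : Int} (hi0 : 0 ≤ i) (hi : i < (A.length : Int))
    (hj0 : 0 ≤ j) (hj : j < (A.length : Int)) :
    testA A i j = true ↔ Disj (PySem.List.pyGetD A i 0) (PySem.List.pyGetD A j 0) := by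
  rw [testA, pyGetD_map_chset hi0 hi, pyGetD_map_chset hj0 hj, List.isEmpty_iff,
    List.eq_nil_iff_forall_not_mem]
  constructor
  · intro h c hc hc'
    exact h c ((PySem.Set.mem_inter _ _ _).mpr ⟨hc, hc'⟩)
  · intro h c hc
    have := (PySem.Set.mem_inter _ _ _).mp hc
    exact h c this.1 this.2

lemma mem_LA {A : List Int} {w : Int} :
    w ∈ LA A ↔ ∃ y z, [y, z].Sublist A ∧ Disj y z ∧ w = y + z := by
  unfold LA
  simp only [List.mem_flatMap, List.mem_map, List.mem_filter, PySem.List.mem_pyRange_one,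
    PySem.List.len_eq]
  constructor
  · rintro ⟨i, ⟨hi0, hin⟩, j, ⟨⟨hj0, hjn⟩, ht⟩, rfl⟩
    refine ⟨PySem.List.pyGetD A i 0, PySem.List.pyGetD A j 0, ?_, ?_, rfl⟩
    · rw [pair_sublist_iff]
      refine ⟨i.toNat, j.toNat, by omega, ?_, ?_⟩
      · rw [PySem.List.pyGetD_eq_getElem A 0 hi0 hin]
        exact List.getElem?_eq_getElem (by omega)
      · rw [PySem.List.pyGetD_eq_getElem A 0 (by omega) hjn]
        exact List.getElem?_eq_getElem (by omega)
    · exact (testA_iff hi0 hin (by omega) hjn).mp ht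
  · rintro ⟨y, z, hsub, hd, rfl⟩
    rw [pair_sublist_iff] at hsub
    obtain ⟨ii, jj, hij, hy, hz⟩ := hsub
    have hjlen : jj < A.length := by
      rcases List.getElem?_eq_some_iff.mp hz with ⟨hlt, _⟩; exact hlt
    have hgy : PySem.List.pyGetD A (ii : Int) 0 = y := by
      simp only [PySem.List.pyGetD_natCast]
      rw [List.getD_eq_getElem?_getD, hy]; rfl
    have hgz : PySem.List.pyGetD A (jj : Int) 0 = z := by
      simp only [PySem.List.pyGetD_natCast]
      rw [List.getD_eq_getElem?_getD, hz]; rfl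
    refine ⟨(ii : Int), ⟨by omega, by omega⟩, (jj : Int), ⟨⟨by omega, by omega⟩, ?_⟩, ?_⟩
    · rw [testA_iff (by omega) (by omega) (by omega) (by omega), hgy, hgz]
      exact hd
    · rw [sumA, hgy, hgz]

lemma solution_goodRes (A : List Int) : GoodRes A (solution A) := by
  rw [solution_eq]
  refine ⟨?_, (PySem.List.le_foldl_max (LA A) (-1)).1, ?_⟩
  · rcases PySem.List.foldl_max_mem (LA A) (-1) with h | h
    · exact Or.inl h
    · exact Or.inr (mem_LA.mp h)
  · intro y z hsub hd
    exact (PySem.List.le_foldl_max (LA A) (-1)).2 _ (mem_LA.mpr ⟨y, z, hsub, hd, rfl⟩)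

-- ---- B side ----

def StInv (pre : List Int) (st : Int × PySem.Dict (List Char) Int) : Prop :=
  GoodRes pre st.1 ∧
  st.2.keys.Nodup ∧
  (∀ p ∈ st.2.items, p.2 ∈ pre ∧ canonKey p.2 = p.1) ∧
  (∀ y ∈ pre, ∃ v, st.2.get? (canonKey y) = some v ∧ y ≤ v)

lemma stinv_step {pre : List Int} {st : Int × PySem.Dict (List Char) Int} (h : StInv pre st)
    (x : Int) : StInv (pre ++ [x]) (solutionAltStep st x) := by
  obtain ⟨b, d⟩ := st
  obtain ⟨⟨hwit, hlb, hub⟩, hnd, hitems, hlook⟩ := h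
  have hb' : (solutionAltStep (b, d) x).1 =
      ((d.items.filter (fun p => PySem.Set.isdisjoint (chset x) p.1)).map
        (fun p => p.2 + x)).foldl max b := by
    have h0 : (solutionAltStep (b, d) x).1 = d.items.foldl (fun best p =>
        if PySem.Set.isdisjoint (chset x) p.1 then
          (if p.2 + x > best then p.2 + x else best) else best) b := rfl
    rw [h0, foldl_ifmax_eq]
  have hd' : (solutionAltStep (b, d) x).2 =
      if (!d.contains (canonKey x) || decide (d.getD (canonKey x) 0 < x)) = true then
        d.insert (canonKey x) x else d := rfl
  have hLBmem : ∀ w ∈ (d.items.filter (fun p => PySem.Set.isdisjoint (chset x) p.1)).map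
      (fun p => p.2 + x), ∃ v, v ∈ pre ∧ Disj v x ∧ w = v + x := by
    intro w hw
    simp only [List.mem_map, List.mem_filter] at hw
    obtain ⟨p, ⟨hpitems, hdisj⟩, rfl⟩ := hw
    obtain ⟨hpmem, hpkey⟩ := hitems p hpitems
    refine ⟨p.2, hpmem, ?_, rfl⟩
    intro c hc hcx
    exact (PySem.Set.isdisjoint_iff _ _).mp hdisj c hcx (hpkey ▸ mem_canonKey.mpr hc)
  refine ⟨?_, ?_, ?_, ?_⟩
  · -- GoodRes (pre ++ [x]) best'
    rw [hb']
    have hble := (PySem.List.le_foldl_max ((d.items.filter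
      (fun p => PySem.Set.isdisjoint (chset x) p.1)).map (fun p => p.2 + x)) b).1
    refine ⟨?_, by omega, ?_⟩
    · rcases PySem.List.foldl_max_mem ((d.items.filter
        (fun p => PySem.Set.isdisjoint (chset x) p.1)).map (fun p => p.2 + x)) b with he | hm
      · rw [he]
        rcases hwit with h1 | ⟨y, z, hsub, hd2, rfl⟩
        · exact Or.inl h1
        · exact Or.inr ⟨y, z, hsub.trans (List.sublist_append_left pre [x]), hd2, rfl⟩
      · obtain ⟨v, hv, hdisj, heq⟩ := hLBmem _ hm
        exact Or.inr ⟨v, x, pair_sublist_append_singleton.mpr (Or.inr ⟨hv, rfl⟩), hdisj, heq⟩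
    · intro y z hsub hdisj
      rcases pair_sublist_append_singleton.mp hsub with hold | ⟨hy, hz⟩
      · exact le_trans (hub y z hold hdisj) hble
      · rw [hz] at hdisj ⊢
        obtain ⟨v, hget, hyv⟩ := hlook y hy
        have hkin : (canonKey y, v) ∈ d.items := PySem.Dict.mem_items_of_get?_eq_some _ hget
        have hdtest : PySem.Set.isdisjoint (chset x) (canonKey y) = true := by
          rw [PySem.Set.isdisjoint_iff]
          intro c hcx hcy
          exact hdisj c (mem_canonKey.mp hcy) hcx
        have hmem : v + x ∈ (d.items.filter
            (fun p => PySem.Set.isdisjoint (chset x) p.1)).map (fun p => p.2 + x) := by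
          simp only [List.mem_map, List.mem_filter]
          exact ⟨(canonKey y, v), ⟨hkin, hdtest⟩, rfl⟩
        have := (PySem.List.le_foldl_max ((d.items.filter
          (fun p => PySem.Set.isdisjoint (chset x) p.1)).map (fun p => p.2 + x)) b).2 _ hmem
        omega
  · -- keys Nodup
    rw [hd']; split_ifs with hc
    · exact PySem.Dict.nodup_keys_insert _ _ _ hnd
    · exact hnd
  · -- items
    intro p hp
    rw [hd'] at hp; split_ifs at hp with hc
    · rcases (PySem.Dict.mem_items_insert _ _ _ _).mp hp with rfl | ⟨hpold, _⟩
      · exact ⟨by simp, rfl⟩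
      · obtain ⟨hm, hkey⟩ := hitems p hpold
        exact ⟨by simp [hm], hkey⟩
    · obtain ⟨hm, hkey⟩ := hitems p hp
      exact ⟨by simp [hm], hkey⟩
  · -- lookup
    intro y hy
    rw [hd']
    rcases List.mem_append.mp hy with hy | hy
    · obtain ⟨v, hget, hyv⟩ := hlook y hy
      by_cases hkey : canonKey y = canonKey x
      · split_ifs with hc
        · refine ⟨x, by rw [hkey]; exact PySem.Dict.get?_insert_self _ _ _, ?_⟩
          have hcont : d.contains (canonKey x) = true := by
            rw [PySem.Dict.contains_eq_isSome_get?, ← hkey, hget]; rfl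
          simp only [Bool.or_eq_true, Bool.not_eq_true', decide_eq_true_eq] at hc
          rcases hc with hc | hc
          · rw [hcont] at hc; cases hc
          · have hgd : d.getD (canonKey x) 0 = v := by
              rw [← hkey]; exact PySem.Dict.getD_of_get?_eq_some _ _ hget
            omega
        · exact ⟨v, hget, hyv⟩
      · split_ifs with hc
        · exact ⟨v, by rw [PySem.Dict.get?_insert_of_ne _ _ hkey]; exact hget, hyv⟩
        · exact ⟨v, hget, hyv⟩
    · have hyx : y = x := by simpa using hy
      subst hyx
      split_ifs with hc
      · exact ⟨y, PySem.Dict.get?_insert_self _ _ _, le_refl y⟩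
      · simp only [Bool.or_eq_true, Bool.not_eq_true', decide_eq_true_eq, not_or] at hc
        obtain ⟨hc1, hc2⟩ := hc
        have hcont : d.contains (canonKey y) = true := by simpa using hc1
        have hsome : (d.get? (canonKey y)).isSome := by
          rw [← PySem.Dict.contains_eq_isSome_get?]; exact hcont
        obtain ⟨w, hw⟩ := Option.isSome_iff_exists.mp hsome
        have hgd : d.getD (canonKey y) 0 = w := PySem.Dict.getD_of_get?_eq_some _ _ hw
        exact ⟨w, hw, by omega⟩

lemma stinv_foldl (A : List Int) : ∀ (pre : List Int) (st : Int × PySem.Dict (List Char) Int),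
    StInv pre st → StInv (pre ++ A) (A.foldl solutionAltStep st) := by
  induction A with
  | nil => intro pre st h; simpa using h
  | cons a t ih =>
    intro pre st h
    have := ih (pre ++ [a]) (solutionAltStep st a) (stinv_step h a)
    simpa using this

lemma solution_alt_goodRes (A : List Int) : GoodRes A (solution_alt A) := by
  have h0 : StInv [] ((-1 : Int), PySem.Dict.empty) := by
    refine ⟨⟨Or.inl rfl, by norm_num, ?_⟩, ?_, ?_, ?_⟩
    · intro y z hsub; simp at hsub
    · simp [PySem.Dict.keys, PySem.Dict.empty]
    · intro p hp; simp [PySem.Dict.empty] at hp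
    · intro y hy; simp at hy
  have := stinv_foldl A [] _ h0
  simpa [solution_alt] using this.1

-- ===== VERDICT (by name: the statement is the Claim_ definition above) =====
theorem solution_spec : Claim_equal_solution := by
  intro A _
  unfold Spec_solution
  exact goodRes_unique (solution_goodRes A) (solution_alt_goodRes A)
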